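-- pv_equiv track=rewrite | github.com/Cyril-44/C-Cpp | !Luogu/T725270_NNOI/gen.py | brute_ans
-- ===== SOURCE A (Python) =====
-- def brute_ans(a: list[int]) -> int:
--     # O(n^2)，适合 n<=8000 左右
--     n = len(a)
--     a = [0] + a  # 1-index
--     ans = 0
--     for j in range(2, n):
--         aj = a[j]
--         lim = j - 1
--         if n - j < lim:
--             lim = n - j
--         for d in range(1, lim + 1):
--             if a[j - d] < aj < a[j + d]:
--                 ans += 1
--     return ans
-- ===== SOURCE B (Python) =====
-- def brute_ans(a: list[int]) -> int:
--     # Sort positions by value and sweep value groups, maintaining bitmasks of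
--     # strictly-smaller / strictly-greater positions; each center's valid radii
--     # are counted with one popcount of shifted masks instead of an inner loop.
--     n = len(a)
--     full = (1 << n) - 1
--     order = sorted(range(n), key=lambda p: a[p])
--     ans = 0
--     less = 0       # bit p set  <=>  a[p] < current group's value
--     less_rev = 0   # bit (n-1-p) set  <=>  a[p] < current group's value
--     i = 0
--     while i < n:
--         v = a[order[i]]
--         k = i
--         eq = 0
--         while k < n and a[order[k]] == v:
--             eq |= 1 << order[k]
--             k += 1
--         greater = full ^ (less | eq)
--         for t in range(i, k):
--             j = order[t]
--             lim = min(j, n - 1 - j)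
--             lmask = less_rev >> (n - 1 - j)
--             rmask = greater >> j
--             window = (1 << (lim + 1)) - 2  # bits 1..lim
--             ans += (lmask & rmask & window).bit_count()
--         less |= eq
--         for t in range(i, k):
--             less_rev |= 1 << (n - 1 - order[t])
--         i = k
--     return ans
-- ===== Notes on version B (the rewrite author's own statement) =====
-- stated objective: faster
-- what changed: Instead of A's center-and-radius double loop, B sorts positions by value and sweeps equal-value groups while maintaining big-integer bitmasks of strictly-smaller and strictly-greater positions; for each center the valid radii are counted by one popcount of shifted masks, so the inner radius loop becomes word-parallel bit operations.
import Mathlib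
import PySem

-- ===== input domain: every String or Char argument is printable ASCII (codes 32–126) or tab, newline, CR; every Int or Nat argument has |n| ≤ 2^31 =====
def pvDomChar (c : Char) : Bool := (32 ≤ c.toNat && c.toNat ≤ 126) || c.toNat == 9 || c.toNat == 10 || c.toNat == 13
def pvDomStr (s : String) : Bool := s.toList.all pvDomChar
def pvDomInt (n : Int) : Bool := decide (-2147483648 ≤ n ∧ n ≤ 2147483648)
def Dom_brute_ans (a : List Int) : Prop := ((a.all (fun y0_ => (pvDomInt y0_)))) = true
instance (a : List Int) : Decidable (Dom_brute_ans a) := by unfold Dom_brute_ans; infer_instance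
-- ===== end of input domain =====

-- B replaces A's center-and-radius double loop by a sort of positions by value and a sweep of
-- equal-value groups maintaining bitmasks of smaller/greater positions; each center's valid
-- radii are counted by one popcount of shifted masks (measured faster in a timing run).

-- ===== PORT A =====
def brute_ans (a : List Int) : Int :=
  let n : Int := a.length
  let a1 : List Int := 0 :: a          -- a = [0] + a  (1-indexing)
  (PySem.List.pyRange 2 n 1).foldl (fun ans j =>
    let aj : Int := PySem.List.pyGetD a1 j 0      -- indices 1..n are always in range for a1
    let lim : Int := if n - j < j - 1 then n - j else j - 1
    (PySem.List.pyRange 1 (lim + 1) 1).foldl (fun ans d =>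
      if PySem.List.pyGetD a1 (j - d) 0 < aj ∧ aj < PySem.List.pyGetD a1 (j + d) 0 then ans + 1 else ans) ans) 0

-- ===== PORT B =====
-- int.bit_count() (a Python stdlib call), ported as the corresponding popcount function
def pvPop (m : Nat) : Nat :=
  if m = 0 then 0 else m % 2 + pvPop (m / 2)
termination_by m
decreasing_by exact Nat.div_lt_self (Nat.pos_of_ne_zero (by assumption)) one_lt_two

-- the outer `while i < n` sweep of Source B: consume one equal-value group of the sorted order per step
def pvSweep (a : List Int) (n full : Nat) : List Nat → Nat → Nat → Int → Int
  | [], _, _, ans => ans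
  | p :: tl, less, lessRev, ans =>
    let v := a.getD p 0
    let grp := p :: tl.takeWhile (fun q => a.getD q 0 == v)       -- the inner `while … == v` group scan
    let rest' := tl.dropWhile (fun q => a.getD q 0 == v)
    let eqm := grp.foldl (fun m q => m ||| (1 <<< q)) 0
    let greater := full ^^^ (less ||| eqm)
    let ans' := grp.foldl (fun s j =>
      let lim := min j (n - 1 - j)
      s + ((pvPop ((lessRev >>> (n - 1 - j)) &&& (greater >>> j) &&& ((1 <<< (lim + 1)) - 2)) : Nat) : Int)) ans
    pvSweep a n full rest' (less ||| eqm)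
      (grp.foldl (fun m q => m ||| (1 <<< (n - 1 - q))) lessRev) ans'
termination_by rest => rest.length
decreasing_by simpa using Nat.lt_succ_of_le (List.dropWhile_sublist _).length_le

def brute_ans_alt (a : List Int) : Int :=
  let n := a.length
  pvSweep a n ((1 <<< n) - 1)
    (PySem.List.sorted (List.range n) (fun p => a.getD p 0) false) 0 0 0

-- ===== PRECONDITION & SPEC =====
def Spec_brute_ans (a : List Int) (out : Int) : Prop := out = brute_ans_alt a
instance (a : List Int) (out : Int) : Decidable (Spec_brute_ans a out) := by unfold Spec_brute_ans; infer_instance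

-- ===== CLAIM (what is proved, stated in full; the proofs are below) =====
def Claim_equal_brute_ans : Prop := ∀ (a : List Int), Dom_brute_ans a → Spec_brute_ans a (brute_ans a)

-- ===== LEMMAS AND PROOFS =====

-- the common triple condition, indexed by 0-based center c and radius d
def pvCondA (a : List Int) (c d : Nat) : Bool :=
  decide (1 ≤ d ∧ d ≤ c ∧ c + d < a.length ∧
    (a.getD (c - d) 0 < a.getD c 0 ∧ a.getD c 0 < a.getD (c + d) 0))

def pvCnt (a : List Int) (j : Nat) : Int :=
  ∑ d ∈ Finset.range a.length, (if pvCondA a j d then (1:Int) else 0)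

lemma pvSum_map_range (n : Nat) (f : Nat → Int) :
    ((List.range n).map f).sum = ∑ i ∈ Finset.range n, f i := by
  induction n with
  | zero => simp
  | succ m ih =>
      rw [List.range_succ, Finset.sum_range_succ, List.map_append, List.sum_append, ih]; simp

lemma pvCountP_range (m : Nat) (q : Nat → Bool) :
    (((List.range m).countP q : Nat) : Int) = ∑ t ∈ Finset.range m, (if q t then (1:Int) else 0) := by
  induction m with
  | zero => simp
  | succ m ih =>
      rw [List.range_succ, Finset.sum_range_succ, List.countP_append, ← ih]
      push_cast [List.countP_cons]
      split <;> simp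

-- restrict an outer sum over range n0 to the window [lo, hi) where alone it is nonzero
lemma pvSum_window (n0 lo hi : Nat) (F : Nat → Int) (hhi : hi ≤ n0)
    (hz : ∀ x, x < n0 → (x < lo ∨ hi ≤ x) → F x = 0) :
    ∑ x ∈ Finset.range n0, F x = ∑ t ∈ Finset.range (hi - lo), F (lo + t) := by
  rw [← Finset.sum_Ico_eq_sum_range]
  apply (Finset.sum_subset ?_ ?_).symm
  · intro x hx; simp only [Finset.mem_Ico, Finset.mem_range] at hx ⊢; omega
  · intro x hx hnx
    simp only [Finset.mem_Ico, Finset.mem_range, not_and, not_lt] at hx hnx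
    exact hz x hx (by omega)

-- an inner 0/1 sum whose condition bounds the radius to [1, L] is the shifted sum over range L
lemma pvSum_inner (n0 L : Nat) (hL : L < n0) (Q V : Nat → Bool)
    (hQ : ∀ d, Q d = (decide (1 ≤ d ∧ d ≤ L) && V d)) :
    ∑ d ∈ Finset.range n0, (if Q d then (1:Int) else 0)
      = ∑ t ∈ Finset.range L, (if V (1 + t) then (1:Int) else 0) := by
  have h1 : ∑ d ∈ Finset.range n0, (if Q d then (1:Int) else 0)
      = ∑ d ∈ Finset.Ico 1 (L + 1), (if Q d then (1:Int) else 0) := by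
    apply (Finset.sum_subset ?_ ?_).symm
    · intro x hx; simp only [Finset.mem_Ico, Finset.mem_range] at hx ⊢; omega
    · intro x hx hnx
      simp only [Finset.mem_Ico, Finset.mem_range, not_and, not_lt] at hx hnx
      rw [hQ]; simp only [Bool.and_eq_true, decide_eq_true_eq]
      rw [if_neg]; rintro ⟨⟨h1, h2⟩, -⟩; omega
  rw [h1, Finset.sum_Ico_eq_sum_range, Nat.add_sub_cancel]
  apply Finset.sum_congr rfl
  intro t ht
  simp only [Finset.mem_range] at ht
  have hb : decide (1 ≤ 1 + t ∧ 1 + t ≤ L) = true := by simp; omega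
  rw [hQ, hb, Bool.true_and]

lemma pvA (a : List Int) :
    brute_ans a = ∑ c ∈ Finset.range a.length, pvCnt a c := by
  unfold brute_ans pvCnt
  simp only [PySem.List.foldl_ite_add_one, PySem.List.foldl_add, zero_add]
  rw [PySem.List.pyRange_one, List.map_map, pvSum_map_range]
  have hton : (((a.length : Int)) - 2).toNat = a.length - 2 := by omega
  rw [hton]
  rw [pvSum_window a.length 1 (a.length - 1)
      (fun c => ∑ d ∈ Finset.range a.length, (if pvCondA a c d then (1:Int) else 0))
      (by omega) ?hz]
  case hz =>
    intro c _ hcr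
    apply Finset.sum_eq_zero
    intro d _
    rw [if_neg]
    simp only [pvCondA, decide_eq_true_eq, not_and]
    intro h1 h2 h3; omega
  have hlen : a.length - 1 - 1 = a.length - 2 := by omega
  rw [hlen]
  apply Finset.sum_congr rfl
  intro k hk
  simp only [Finset.mem_range] at hk
  simp only [Function.comp_apply]
  rw [PySem.List.pyRange_one, List.countP_map]
  have h1 : (((if (a.length : Int) - (2 + (k:Int)) < 2 + (k:Int) - 1 then (a.length : Int) - (2 + (k:Int))
      else 2 + (k:Int) - 1) + 1) - 1).toNat = min (k + 1) (a.length - k - 2) := by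
    split_ifs <;> omega
  rw [h1, pvCountP_range]
  rw [pvSum_inner a.length (min (k + 1) (a.length - k - 2)) (by omega)
      (fun d => pvCondA a (1 + k) d)
      (fun d => decide (a.getD (1 + k - d) 0 < a.getD (1 + k) 0 ∧ a.getD (1 + k) 0 < a.getD (1 + k + d) 0))
      ?hQ]
  case hQ =>
    intro d
    rw [Bool.eq_iff_iff]
    simp only [pvCondA, Bool.and_eq_true, decide_eq_true_eq]
    constructor
    · rintro ⟨h1, h2, h3, h4, h5⟩
      exact ⟨⟨h1, by omega⟩, h4, h5⟩
    · rintro ⟨⟨h1, h2⟩, h4, h5⟩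
      exact ⟨h1, by omega, by omega, h4, h5⟩
  apply Finset.sum_congr rfl
  intro t ht
  simp only [Finset.mem_range] at ht
  have htk : t ≤ k := by omega
  congr 1
  simp only [Function.comp_apply]
  have e1 : (2 + (k:Int)) - (1 + (t:Int)) = (((k - t) + 1 : Nat) : Int) := by omega
  have e3 : (2 + (k:Int)) + (1 + (t:Int)) = (((k + t + 2) + 1 : Nat) : Int) := by omega
  have e2 : (2 + (k:Int)) = (((k + 1) + 1 : Nat) : Int) := by omega
  rw [e1, e3, e2]
  simp only [PySem.List.pyGetD_natCast, List.getD_cons_succ]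
  rw [show 1 + k - (1 + t) = k - t from by omega, show 1 + k + (1 + t) = k + t + 2 from by omega,
    show 1 + k = k + 1 from by omega]

-- ---------- B-side bit lemmas ----------

lemma pvPop_eq (k : Nat) : ∀ m, m < 2 ^ k →
    pvPop m = ∑ d ∈ Finset.range k, (if m.testBit d then 1 else 0) := by
  induction k with
  | zero =>
      intro m hm
      interval_cases m
      simp [pvPop]
  | succ k ih =>
      intro m hm
      by_cases h0 : m = 0
      · subst h0; simp [pvPop]
      · rw [pvPop, if_neg h0, Finset.sum_range_succ']
        have hdiv : m / 2 < 2 ^ k := by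
          have : (2:Nat) ^ (k+1) = 2 * 2 ^ k := by ring
          omega
        rw [ih (m / 2) hdiv]
        have hb0 : (if m.testBit 0 then 1 else 0) = m % 2 := by
          rcases Nat.mod_two_eq_zero_or_one m with h | h <;> simp [Nat.testBit_zero, h]
        have hbs : ∀ d, m.testBit (d + 1) = (m / 2).testBit d := by
          intro d; simpa using Nat.testBit_succ m d
        simp only [hbs, hb0]
        omega

lemma pvTestBit_foldl_or (f : Nat → Nat) (l : List Nat) (init : Nat) (t : Nat) :
    (l.foldl (fun m q => m ||| (1 <<< f q)) init).testBit t
      = (init.testBit t || l.any (fun q => f q == t)) := by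
  induction l generalizing init with
  | nil => simp
  | cons x xs ih =>
      rw [List.foldl_cons, ih, List.any_cons]
      simp only [Nat.testBit_or, Nat.shiftLeft_eq, one_mul, Nat.testBit_two_pow]
      rw [Bool.or_assoc]
      congr 1

lemma pvTestBit_window (L d : Nat) :
    ((1 <<< (L + 1)) - 2).testBit d = decide (1 ≤ d ∧ d ≤ L) := by
  have h2 : (1:Nat) ≤ 2 ^ L := Nat.one_le_two_pow
  have h : (1 <<< (L + 1)) - 2 = 2 * (2 ^ L - 1) := by
    simp only [Nat.shiftLeft_eq, one_mul, pow_succ]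
    omega
  cases d with
  | zero =>
      rw [h]
      simp [Nat.testBit_zero, Nat.mul_mod_right]
  | succ d =>
      rw [h]
      have : (2 * (2 ^ L - 1)).testBit (d + 1) = (2 ^ L - 1).testBit d := by
        simpa [Nat.mul_div_cancel_left] using Nat.testBit_succ (2 * (2 ^ L - 1)) d
      rw [this, Nat.testBit_two_pow_sub_one]
      rw [decide_eq_decide]
      omega

lemma pvTestBit_full (n q : Nat) : ((1 <<< n) - 1).testBit q = decide (q < n) := by
  simp [Nat.shiftLeft_eq, Nat.testBit_two_pow_sub_one]

lemma pvDropWhile_lt (a : List Int) (v : Int) :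
    ∀ (tl : List Nat), tl.Pairwise (fun x y => a.getD x 0 ≤ a.getD y 0) →
    (∀ x ∈ tl, v ≤ a.getD x 0) →
    ∀ q ∈ tl.dropWhile (fun q => a.getD q 0 == v), v < a.getD q 0 := by
  intro tl
  induction tl with
  | nil => simp
  | cons x t ih =>
      intro hp hge q hq
      rw [List.dropWhile_cons] at hq
      split at hq
      · exact ih (List.pairwise_cons.mp hp).2 (fun y hy => hge y (List.mem_cons_of_mem _ hy)) q hq
      · rename_i hne
        have hxv : a.getD x 0 ≠ v := by simpa using hne
        have hvx : v < a.getD x 0 := lt_of_le_of_ne (hge x (List.mem_cons_self ..)) (Ne.symm hxv)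
        rcases List.mem_cons.mp hq with rfl | hqt
        · exact hvx
        · exact lt_of_lt_of_le hvx ((List.pairwise_cons.mp hp).1 q hqt)

lemma pvFoldl_add_sum {α : Type} (g : α → Int) : ∀ (l : List α) (ans : Int),
    l.foldl (fun s x => s + g x) ans = ans + (l.map g).sum := by
  intro l
  induction l with
  | nil => simp
  | cons x t ih => intro ans; simp [ih]; ring

-- the sweep invariant: processed positions are exactly the bits of `less`, and they are
-- exactly the positions with value below every remaining one
lemma pvAny_mem (l : List Nat) (t : Nat) : l.any (fun q => q == t) = decide (t ∈ l) := by
  rw [Bool.eq_iff_iff]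
  simp [List.any_eq_true, beq_iff_eq]

lemma pvSweep_eq (a : List Int) :
    ∀ (N : Nat) (rest : List Nat) (less lessRev : Nat) (ans : Int),
    rest.length ≤ N →
    rest.Nodup →
    (∀ p ∈ rest, p < a.length) →
    rest.Pairwise (fun x y => a.getD x 0 ≤ a.getD y 0) →
    (∀ q, less.testBit q = decide (q < a.length ∧ q ∉ rest)) →
    (∀ q, lessRev.testBit q = decide (q < a.length ∧ (a.length - 1 - q) ∉ rest)) →
    (∀ q, q < a.length → q ∉ rest → ∀ p ∈ rest, a.getD q 0 < a.getD p 0) →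
    pvSweep a a.length ((1 <<< a.length) - 1) rest less lessRev ans
      = ans + (rest.map (fun j => pvCnt a j)).sum := by
  intro N
  induction N with
  | zero =>
      intro rest less lessRev ans hlen _ _ _ _ _ _
      have : rest = [] := List.eq_nil_of_length_eq_zero (by omega)
      subst this
      simp [pvSweep]
  | succ N ih =>
      intro rest less lessRev ans hlen h1 h2 h3 h4 h5 h6
      cases rest with
      | nil => simp [pvSweep]
      | cons p tl =>
        set n := a.length with hn
        set v := a.getD p 0 with hv
        set tw := tl.takeWhile (fun q => a.getD q 0 == v) with htw
        set dw := tl.dropWhile (fun q => a.getD q 0 == v) with hdw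
        set grp : List Nat := p :: tw with hgrpdef
        have hsplit : tw ++ dw = tl := List.takeWhile_append_dropWhile
        have hpn : p < n := h2 p (List.mem_cons_self ..)
        have hn1 : 1 ≤ n := by omega
        have hmin : ∀ y ∈ tl, v ≤ a.getD y 0 := (List.pairwise_cons.mp h3).1
        have htlpw : tl.Pairwise (fun x y => a.getD x 0 ≤ a.getD y 0) := (List.pairwise_cons.mp h3).2
        have hdw_lt : ∀ q ∈ dw, v < a.getD q 0 := pvDropWhile_lt a v tl htlpw hmin
        have hptl : p ∉ tl := (List.nodup_cons.mp h1).1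
        have htlnd : tl.Nodup := (List.nodup_cons.mp h1).2
        have hgrp_mem : ∀ q, q ∈ grp ↔ (q ∈ p :: tl ∧ a.getD q 0 = v) := by
          intro q
          constructor
          · intro hq
            rcases List.mem_cons.mp hq with rfl | hq
            · exact ⟨List.mem_cons_self .., rfl⟩
            · refine ⟨List.mem_cons_of_mem _ ((List.takeWhile_sublist _).subset hq), ?_⟩
              have := List.mem_takeWhile_imp hq
              simpa using this
          · rintro ⟨hq, hqv⟩
            rcases List.mem_cons.mp hq with rfl | hq
            · exact List.mem_cons_self ..
            · rw [← hsplit] at hq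
              rcases List.mem_append.mp hq with hq | hq
              · exact List.mem_cons_of_mem _ hq
              · exact absurd hqv (by have := hdw_lt q hq; omega)
        have hgrp_n : ∀ q ∈ grp, q < n := by
          intro q hq; exact h2 q ((hgrp_mem q).mp hq).1
        have hdisj : ∀ q ∈ grp, q ∉ dw := by
          intro q hq hqd
          rcases List.mem_cons.mp ((hgrp_mem q).mp hq).1 with rfl | _
          · exact hptl ((List.dropWhile_sublist _).subset hqd)
          · have := hdw_lt q hqd
            have := ((hgrp_mem q).mp hq).2
            omega
        have hmem_split : ∀ q, q ∈ p :: tl ↔ q ∈ grp ∨ q ∈ dw := by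
          intro q
          constructor
          · intro hq
            rcases List.mem_cons.mp hq with rfl | hq
            · exact Or.inl (List.mem_cons_self ..)
            · rw [← hsplit] at hq
              rcases List.mem_append.mp hq with hq | hq
              · exact Or.inl (List.mem_cons_of_mem _ hq)
              · exact Or.inr hq
          · rintro (hq | hq)
            · exact ((hgrp_mem q).mp hq).1
            · exact List.mem_cons_of_mem _ ((List.dropWhile_sublist _).subset hq)
        -- processed-set update: within range, "not in rest or in current group" = "not in new rest"
        have hproc : ∀ r, r < n → ((r ∉ (p :: tl) ∨ r ∈ grp) ↔ r ∉ dw) := by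
          intro r _
          constructor
          · rintro (hr | hr)
            · intro hrd; exact hr ((hmem_split r).mpr (Or.inr hrd))
            · exact hdisj r hr
          · intro hr
            by_cases hrm : r ∈ p :: tl
            · rcases (hmem_split r).mp hrm with h | h
              · exact Or.inr h
              · exact absurd h hr
            · exact Or.inl hrm
        rw [pvSweep]
        simp only []
        set eqm := grp.foldl (fun m q => m ||| (1 <<< q)) 0 with heqmdef
        set greater := ((1 <<< n) - 1) ^^^ (less ||| eqm) with hgtdef
        have heqm : ∀ t, eqm.testBit t = decide (t ∈ grp) := by
          intro t
          have h := pvTestBit_foldl_or (fun q => q) grp 0 t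
          simp only [Nat.zero_testBit, Bool.false_or] at h
          rw [heqmdef, h, pvAny_mem]
        have hgt : ∀ t, greater.testBit t = decide (t < n ∧ v < a.getD t 0) := by
          intro t
          rw [hgtdef, Nat.testBit_xor, Nat.testBit_or, pvTestBit_full, h4, heqm]
          by_cases htn : t < n
          · by_cases htg : t ∈ grp
            · have htv : a.getD t 0 = v := ((hgrp_mem t).mp htg).2
              have htm : t ∈ p :: tl := ((hgrp_mem t).mp htg).1
              rw [decide_eq_true htn, decide_eq_true htg,
                decide_eq_false (fun h => h.2 htm : ¬(t < n ∧ t ∉ p :: tl)),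
                decide_eq_false (fun h => absurd h.2 (by omega) : ¬(t < n ∧ v < a.getD t 0))]
              rfl
            · by_cases htm : t ∈ p :: tl
              · have htd : t ∈ dw := by
                  rcases (hmem_split t).mp htm with h | h
                  · exact absurd h htg
                  · exact h
                have hlt := hdw_lt t htd
                rw [decide_eq_true htn, decide_eq_false htg,
                  decide_eq_false (fun h => h.2 htm : ¬(t < n ∧ t ∉ p :: tl)),
                  decide_eq_true (⟨htn, hlt⟩ : t < n ∧ v < a.getD t 0)]
                rfl
              · have hlt := h6 t htn htm p (List.mem_cons_self ..)
                rw [decide_eq_true htn, decide_eq_false htg,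
                  decide_eq_true (⟨htn, htm⟩ : t < n ∧ t ∉ p :: tl),
                  decide_eq_false (fun h => absurd h.2 (by omega) : ¬(t < n ∧ v < a.getD t 0))]
                rfl
          · have htg : t ∉ grp := fun h => htn (hgrp_n t h)
            rw [decide_eq_false htn, decide_eq_false htg,
              decide_eq_false (fun h => htn h.1 : ¬(t < n ∧ t ∉ p :: tl)),
              decide_eq_false (fun h => htn h.1 : ¬(t < n ∧ v < a.getD t 0))]
            rfl
        -- per-center popcount = the common triple count
        have hcenter : ∀ j ∈ grp,
            ((pvPop ((lessRev >>> (n - 1 - j)) &&& (greater >>> j) &&&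
              ((1 <<< (min j (n - 1 - j) + 1)) - 2)) : Nat) : Int) = pvCnt a j := by
          intro j hj
          have hjn : j < n := hgrp_n j hj
          have hjv : a.getD j 0 = v := ((hgrp_mem j).mp hj).2
          set L := min j (n - 1 - j) with hL
          set mask := (lessRev >>> (n - 1 - j)) &&& (greater >>> j) &&& ((1 <<< (L + 1)) - 2) with hmask
          have hpow : 2 ^ (L + 1) ≤ 2 ^ n := Nat.pow_le_pow_right (by omega) (by omega)
          have hpow2 : 2 ≤ 2 ^ (L + 1) := by
            have := Nat.one_le_two_pow (n := L)
            calc 2 = 2 * 1 := by omega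
            _ ≤ 2 * 2 ^ L := by omega
            _ = 2 ^ (L + 1) := by ring
          have hmlt : mask < 2 ^ n := by
            have h1 : mask ≤ (1 <<< (L + 1)) - 2 := Nat.and_le_right
            have h2 : (1 <<< (L + 1)) = 2 ^ (L + 1) := by simp [Nat.shiftLeft_eq]
            omega
          rw [pvPop_eq n mask hmlt]
          rw [pvCnt]
          push_cast [apply_ite (fun x : Nat => (x : Int))]
          apply Finset.sum_congr rfl
          intro d _
          congr 1
          rw [hmask, Nat.testBit_and, Nat.testBit_and, Nat.testBit_shiftRight,
            Nat.testBit_shiftRight, pvTestBit_window, h5, hgt]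
          rw [pvCondA, ← Bool.decide_and, ← Bool.decide_and]
          simp only [decide_eq_true_eq]
          rw [eq_iff_iff]
          constructor
          · rintro ⟨⟨⟨hr1, hr2⟩, hg1, hg2⟩, hw1, hw2⟩
            have hd1 : d ≤ j := by omega
            have hd2 : j + d < n := by omega
            have hsub : n - 1 - (n - 1 - j + d) = j - d := by omega
            rw [hsub] at hr2
            have hlt : a.getD (j - d) 0 < v := by
              have := h6 (j - d) (by omega) hr2 p (List.mem_cons_self ..)
              omega
            exact ⟨hw1, hd1, by omega, by omega, by omega⟩
          · rintro ⟨hd1, hd2, hd3, hv1, hv2⟩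
            have hsub : n - 1 - (n - 1 - j + d) = j - d := by omega
            have hr2 : j - d ∉ (p :: tl) := by
              intro hmem
              rcases List.mem_cons.mp hmem with heq | hmem
              · rw [heq] at hv1; omega
              · have := hmin (j - d) hmem; omega
            refine ⟨⟨⟨by omega, by rw [hsub]; exact hr2⟩, by omega, by omega⟩, hd1, by omega⟩
        -- the inner per-group loop is the sum of the per-center counts
        have hfold : ∀ (s : Int),
            grp.foldl (fun s j =>
              s + ((pvPop ((lessRev >>> (n - 1 - j)) &&& (greater >>> j) &&&
                ((1 <<< (min j (n - 1 - j) + 1)) - 2)) : Nat) : Int)) s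
              = s + (grp.map (fun j => pvCnt a j)).sum := by
          intro s
          rw [List.foldl_ext _ (fun s j => s + pvCnt a j) s
            (by intro acc x hx; rw [hcenter x hx])]
          exact pvFoldl_add_sum _ grp s
        -- invariants for the recursive call on dw
        have hdwsub : dw.Sublist tl := List.dropWhile_sublist _
        have ihall := ih dw (less ||| eqm)
          (grp.foldl (fun m q => m ||| (1 <<< (n - 1 - q))) lessRev)
          (grp.foldl (fun s j =>
              s + ((pvPop ((lessRev >>> (n - 1 - j)) &&& (greater >>> j) &&&
                ((1 <<< (min j (n - 1 - j) + 1)) - 2)) : Nat) : Int)) ans)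
          (by have := hdwsub.length_le; simp at hlen; omega)
          (htlnd.sublist hdwsub)
          (fun q hq => h2 q (List.mem_cons_of_mem _ (hdwsub.subset hq)))
          (htlpw.sublist hdwsub)
          (by
            intro q
            rw [Nat.testBit_or, h4, heqm]
            by_cases hqn : q < n
            · rw [Bool.eq_iff_iff]
              simp only [Bool.or_eq_true, decide_eq_true_eq]
              constructor
              · rintro (⟨-, hq⟩ | hq)
                · exact ⟨hqn, ((hproc q hqn).mp (Or.inl hq))⟩
                · exact ⟨hqn, ((hproc q hqn).mp (Or.inr hq))⟩
              · rintro ⟨-, hq⟩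
                rcases (hproc q hqn).mpr hq with h | h
                · exact Or.inl ⟨hqn, h⟩
                · exact Or.inr h
            · have hqg : q ∉ grp := fun h => hqn (hgrp_n q h)
              simp [hqn, hqg])
          (by
            intro m
            have h := pvTestBit_foldl_or (fun q => n - 1 - q) grp lessRev m
            rw [h, h5]
            by_cases hmn : m < n
            · have hany : grp.any (fun q => (n - 1 - q) == m) = decide ((n - 1 - m) ∈ grp) := by
                rw [Bool.eq_iff_iff]
                simp only [List.any_eq_true, beq_iff_eq, decide_eq_true_eq]
                constructor
                · rintro ⟨q, hq, rfl⟩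
                  have := hgrp_n q hq
                  have : n - 1 - (n - 1 - q) = q := by omega
                  rw [this]; exact hq
                · intro hq
                  exact ⟨n - 1 - m, hq, by omega⟩
              rw [hany, Bool.eq_iff_iff]
              simp only [Bool.or_eq_true, decide_eq_true_eq]
              constructor
              · rintro (⟨-, hq⟩ | hq)
                · exact ⟨hmn, (hproc _ (by omega)).mp (Or.inl hq)⟩
                · exact ⟨hmn, (hproc _ (by omega)).mp (Or.inr hq)⟩
              · rintro ⟨-, hq⟩
                rcases (hproc _ (by omega)).mpr hq with h | h
                · exact Or.inl ⟨hmn, h⟩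
                · exact Or.inr h
            · have hany : grp.any (fun q => (n - 1 - q) == m) = false := by
                simp only [List.any_eq_false, beq_iff_eq]
                intro q hq
                have := hgrp_n q hq
                omega
              simp [hany, hmn])
          (by
            intro q hqn hqd p' hp'
            by_cases hqr : q ∈ p :: tl
            · have hqg : q ∈ grp := by
                rcases (hmem_split q).mp hqr with h | h
                · exact h
                · exact absurd h hqd
              have hqv : a.getD q 0 = v := ((hgrp_mem q).mp hqg).2
              have := hdw_lt p' hp'
              omega
            · exact h6 q hqn hqr p' (List.mem_cons_of_mem _ (hdwsub.subset hp')))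
        rw [ihall, hfold]
        have hgrpdw : grp ++ dw = p :: tl := by rw [hgrpdef]; simp [hsplit]
        rw [← hgrpdw, List.map_append, List.sum_append]
        ring

lemma pvB (a : List Int) :
    brute_ans_alt a = ∑ j ∈ Finset.range a.length, pvCnt a j := by
  show pvSweep a a.length ((1 <<< a.length) - 1)
    (PySem.List.sorted (List.range a.length) (fun p => a.getD p 0) false) 0 0 0 = _
  set srt := PySem.List.sorted (List.range a.length) (fun p => a.getD p 0) false with hs
  have hperm : srt.Perm (List.range a.length) := PySem.List.sorted_perm ..
  have hmem : ∀ q, q ∈ srt ↔ q < a.length := by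
    intro q; rw [hperm.mem_iff, List.mem_range]
  rw [pvSweep_eq a srt.length srt 0 0 0 le_rfl
    (hperm.nodup_iff.mpr (List.nodup_range))
    (fun p hp => (hmem p).mp hp)
    (PySem.List.sorted_pairwise ..)
    (fun q => by
      rw [Nat.zero_testBit, eq_comm, decide_eq_false_iff_not]
      rintro ⟨hq, hnq⟩
      exact hnq ((hmem q).mpr hq))
    (fun q => by
      rw [Nat.zero_testBit, eq_comm, decide_eq_false_iff_not]
      rintro ⟨hq, hnq⟩
      exact hnq ((hmem _).mpr (by omega)))
    (fun q hq hnq p hp => absurd ((hmem q).mpr hq) hnq)]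
  rw [zero_add, (hperm.map _).sum_eq, pvSum_map_range]

-- ===== VERDICT (by name: the statement is the Claim_ definition above) =====
theorem brute_ans_spec : Claim_equal_brute_ans := by
  intro a _
  unfold Spec_brute_ans
  rw [pvA, ← pvB]
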